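-- pv_equiv track=rewrite | github.com/GeneDx/pgr-tk | pgr-py/pgr/__init__.py | break_chains
-- ===== SOURCE A (Python) =====
-- def break_chains(chain, size):
--     all_chains = []
--     cur_chain = [chain[0]]
--
--     for elm in chain[1:]:
--         bgn = cur_chain[0][1]
--         if elm[1] == cur_chain[-1][2] and elm[1] - bgn > size:
--             all_chains.append(cur_chain)
--             cur_chain = [elm]
--         else:
--             cur_chain.append(elm)
--
--     if len(cur_chain) > 0:
--         all_chains.append(cur_chain)
--
--     return all_chains
-- ===== SOURCE B (Python) =====
-- def break_chains(chain, size):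
--     if not chain:
--         return []
--     # first pass: find the cut indices
--     cuts = [0]
--     seg_start = 0
--     for i in range(1, len(chain)):
--         if chain[i][1] == chain[i - 1][2] and chain[i][1] - chain[seg_start][1] > size:
--             cuts.append(i)
--             seg_start = i
--     cuts.append(len(chain))
--     # second pass: materialize the pieces
--     return [chain[a:b] for a, b in zip(cuts, cuts[1:])]
-- ===== Notes on version B (the rewrite author's own statement) =====
-- stated objective: alternative
-- what changed: B first computes the list of cut indices by comparing neighbours against the current segment start, then materializes the subchains by slicing between consecutive cuts, instead of incrementally accumulating and appending sublists.
import Mathlib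
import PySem

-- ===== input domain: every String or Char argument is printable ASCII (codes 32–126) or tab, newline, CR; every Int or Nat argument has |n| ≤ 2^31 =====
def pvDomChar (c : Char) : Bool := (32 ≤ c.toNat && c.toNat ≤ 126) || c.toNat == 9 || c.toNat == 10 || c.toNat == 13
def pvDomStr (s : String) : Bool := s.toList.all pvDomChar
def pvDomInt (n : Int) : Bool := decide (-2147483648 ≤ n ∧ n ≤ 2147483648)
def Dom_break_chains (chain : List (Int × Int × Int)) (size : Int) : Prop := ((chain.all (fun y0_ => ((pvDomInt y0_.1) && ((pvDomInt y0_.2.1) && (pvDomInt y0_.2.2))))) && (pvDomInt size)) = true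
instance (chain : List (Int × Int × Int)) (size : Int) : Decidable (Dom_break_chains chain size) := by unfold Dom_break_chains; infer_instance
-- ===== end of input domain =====

-- B separates "where to cut" (one index pass recording cut points) from "materialize the pieces"
-- (slicing between consecutive cuts), instead of A's incremental accumulation of sublists;
-- equal cost, different decomposition. A raises IndexError on an empty chain (excluded by Pre_);
-- B returns [] there.


-- ===== PORT A =====
-- loop body of A: state = (all_chains, cur_chain); cur_chain is always nonempty, so the
-- headD/getLastD defaults (cur_chain[0], cur_chain[-1]) are never used
def pvStepA (size : Int) (c0 : Int × Int × Int)
    (st : List (List (Int × Int × Int)) × List (Int × Int × Int)) (elm : Int × Int × Int) :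
    List (List (Int × Int × Int)) × List (Int × Int × Int) :=
  let bgn := (st.2.headD c0).2.1
  if elm.2.1 = (st.2.getLastD c0).2.2 ∧ elm.2.1 - bgn > size then
    (st.1 ++ [st.2], [elm])
  else
    (st.1, st.2 ++ [elm])

def break_chains (chain : List (Int × Int × Int)) (size : Int) : List (List (Int × Int × Int)) :=
  match chain with
  | [] => []  -- Python raises IndexError on chain[0]; excluded by Pre_break_chains
  | c0 :: _ =>
    let st := (PySem.List.slice chain (some 1) none).foldl (pvStepA size c0) ([], [c0])
    if st.2.length > 0 then st.1 ++ [st.2] else st.1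

-- ===== PORT B =====
-- loop body of B: state = (cuts, seg_start); chain[i], chain[i-1], chain[seg_start] always
-- exist in Python, so the .getD defaults are never used
def pvStepB (chain : List (Int × Int × Int)) (size : Int)
    (st : List Int × Int) (i : Int) : List Int × Int :=
  let ci := (PySem.List.pyGet? chain i).getD (0, 0, 0)
  let cp := (PySem.List.pyGet? chain (i - 1)).getD (0, 0, 0)
  let cs := (PySem.List.pyGet? chain st.2).getD (0, 0, 0)
  if ci.2.1 = cp.2.2 ∧ ci.2.1 - cs.2.1 > size then (st.1 ++ [i], i) else st

def break_chains_alt (chain : List (Int × Int × Int)) (size : Int) : List (List (Int × Int × Int)) :=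
  if chain = [] then []
  else
    let n : Int := chain.length
    let st := (PySem.List.pyRange 1 n 1).foldl (pvStepB chain size) ([0], 0)
    let cuts := st.1 ++ [n]
    (cuts.zip cuts.tail).map (fun ab => PySem.List.slice chain (some ab.1) (some ab.2))

-- ===== PRECONDITION & SPEC =====
-- Pre_ excludes only the empty chain, on which A raises IndexError (chain[0])
def Pre_break_chains (chain : List (Int × Int × Int)) (size : Int) : Prop := chain ≠ []
instance (chain : List (Int × Int × Int)) (size : Int) : Decidable (Pre_break_chains chain size) := by unfold Pre_break_chains; infer_instance
def pvWitness_break_chains : (List (Int × Int × Int)) × Int := ([(0, 0, 5), (1, 5, 9)], 2)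

def Spec_break_chains (chain : List (Int × Int × Int)) (size : Int) (out : List (List (Int × Int × Int))) : Prop := out = break_chains_alt chain size
instance (chain : List (Int × Int × Int)) (size : Int) (out : List (List (Int × Int × Int))) : Decidable (Spec_break_chains chain size out) := by unfold Spec_break_chains; infer_instance

-- ===== CLAIM (what is proved, stated in full; the proofs are below) =====
def Claim_equal_break_chains : Prop := ∀ (chain : List (Int × Int × Int)) (size : Int), Dom_break_chains chain size → Pre_break_chains chain size → Spec_break_chains chain size (break_chains chain size)

-- ===== LEMMAS AND PROOFS =====

-- reference function: both ports compute this greedy segmentation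
def pvGo (size : Int) (c0 : Int × Int × Int) (cur : List (Int × Int × Int)) :
    List (Int × Int × Int) → List (List (Int × Int × Int))
  | [] => [cur]
  | e :: rs =>
    if e.2.1 = (cur.getLastD c0).2.2 ∧ e.2.1 - (cur.headD c0).2.1 > size then
      cur :: pvGo size c0 [e] rs
    else
      pvGo size c0 (cur ++ [e]) rs

-- ---- A side ----
theorem pvA_fold_go (size : Int) (c0 : Int × Int × Int) :
    ∀ (rest : List (Int × Int × Int)) (all : List (List (Int × Int × Int)))
      (cur : List (Int × Int × Int)),
      (rest.foldl (pvStepA size c0) (all, cur)).1 ++ [(rest.foldl (pvStepA size c0) (all, cur)).2]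
        = all ++ pvGo size c0 cur rest := by
  intro rest
  induction rest with
  | nil => intro all cur; simp [pvGo]
  | cons e rs ih =>
    intro all cur
    simp only [List.foldl_cons, pvStepA, pvGo]
    by_cases h : e.2.1 = (cur.getLastD c0).2.2 ∧ e.2.1 - (cur.headD c0).2.1 > size
    · simp only [if_pos h, ih]; simp
    · simp only [if_neg h, ih]

theorem pvA_fold_ne (size : Int) (c0 : Int × Int × Int) :
    ∀ (rest : List (Int × Int × Int)) (all : List (List (Int × Int × Int)))
      (cur : List (Int × Int × Int)), cur ≠ [] →
      (rest.foldl (pvStepA size c0) (all, cur)).2 ≠ [] := by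
  intro rest
  induction rest with
  | nil => intro all cur h; simpa using h
  | cons e rs ih =>
    intro all cur h
    simp only [List.foldl_cons, pvStepA]
    by_cases hc : e.2.1 = (cur.getLastD c0).2.2 ∧ e.2.1 - (cur.headD c0).2.1 > size
    · simp only [if_pos hc]; exact ih _ _ (by simp)
    · simp only [if_neg hc]; exact ih _ _ (by simp)

theorem pvA_eq_go (size : Int) (c0 : Int × Int × Int) (rest : List (Int × Int × Int)) :
    break_chains (c0 :: rest) size = pvGo size c0 [c0] rest := by
  have hne := pvA_fold_ne size c0 rest [] [c0] (by simp)
  have hgo := pvA_fold_go size c0 rest [] [c0]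
  simp only [break_chains, PySem.List.slice_from_one, List.tail_cons]
  rw [if_pos (by simpa [List.length_pos_iff] using hne)]
  simpa using hgo

-- ---- B side ----
-- cut accumulator only grows at the back
theorem pvB_fold_acc (chain : List (Int × Int × Int)) (size : Int) :
    ∀ (r : List Int) (cuts : List Int) (seg : Int),
      r.foldl (pvStepB chain size) (cuts, seg)
        = (cuts ++ (r.foldl (pvStepB chain size) ([], seg)).1,
           (r.foldl (pvStepB chain size) ([], seg)).2) := by
  intro r
  induction r with
  | nil => intro cuts seg; simp
  | cons i t ih =>
    intro cuts seg
    simp only [List.foldl_cons, pvStepB]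
    by_cases h : ((PySem.List.pyGet? chain i).getD (0,0,0)).2.1 = ((PySem.List.pyGet? chain (i-1)).getD (0,0,0)).2.2 ∧ ((PySem.List.pyGet? chain i).getD (0,0,0)).2.1 - ((PySem.List.pyGet? chain seg).getD (0,0,0)).2.1 > size
    · simp only [if_pos h, List.nil_append]
      rw [ih (cuts ++ [i]) i, ih [i] i]
      simp
    · simp only [if_neg h]
      rw [ih cuts seg]

theorem pv_take_headD (l : List (Int × Int × Int)) (s m : ℕ) (c0 : Int × Int × Int)
    (hs : s < l.length) (hm : 1 ≤ m) :
    (((l.drop s).take m).headD c0) = l[s] := by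
  cases m with
  | zero => omega
  | succ m =>
    rw [List.drop_eq_getElem_cons hs, List.take_succ_cons]
    rfl

theorem pv_take_concat (l : List (Int × Int × Int)) (s j : ℕ)
    (hs : s ≤ j) (hj : j < l.length) :
    (l.drop s).take (j + 1 - s) = (l.drop s).take (j - s) ++ [l[j]] := by
  have h1 : j + 1 - s = (j - s) + 1 := by omega
  rw [h1, List.take_succ]
  have h2 : (l.drop s)[j - s]? = some l[j] := by
    rw [List.getElem?_drop]
    have : s + (j - s) = j := by omega
    rw [this, List.getElem?_eq_getElem hj]
  simp [h2]

def pvPairs (chain : List (Int × Int × Int)) (cuts : List Int) : List (List (Int × Int × Int)) :=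
  (cuts.zip cuts.tail).map (fun ab => PySem.List.slice chain (some ab.1) (some ab.2))

theorem pv_take_getLastD (l : List (Int × Int × Int)) (s j : ℕ) (c0 : Int × Int × Int)
    (hs : s < j) (hj : j ≤ l.length) :
    ((l.drop s).take (j - s)).getLastD c0 = l[j-1]'(by omega) := by
  have h := pv_take_concat l s (j-1) (by omega) (by omega)
  have hj' : (j-1) + 1 - s = j - s := by omega
  rw [hj'] at h
  rw [h]
  simp

theorem pvPairs_cons (chain : List (Int × Int × Int)) (a b : Int) (t : List Int) :
    pvPairs chain (a :: b :: t)
      = PySem.List.slice chain (some a) (some b) :: pvPairs chain (b :: t) := by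
  simp [pvPairs]

theorem pv_main (chain : List (Int × Int × Int)) (size : Int) (c0 : Int × Int × Int) :
    ∀ (k j seg : ℕ), j + k = chain.length → seg < j →
      pvPairs chain ((seg : Int) ::
          ((PySem.List.pyRange (j : Int) (chain.length : Int) 1).foldl (pvStepB chain size)
            ([], (seg : Int))).1 ++ [(chain.length : Int)])
        = pvGo size c0 ((chain.drop seg).take (j - seg)) (chain.drop j) := by
  intro k
  induction k with
  | zero =>
    intro j seg hjk hsj
    have hj : j = chain.length := by omega
    subst hj
    rw [PySem.List.pyRange_one_eq_nil (le_refl _)]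
    simp [pvPairs, pvGo, PySem.List.slice_natCast]
  | succ k ih =>
    intro j seg hjk hsj
    have hjlt : j < chain.length := by omega
    have hseglt : seg < chain.length := by omega
    have hcons : PySem.List.pyRange (j : Int) (chain.length : Int) 1
        = (j : Int) :: PySem.List.pyRange ((j : Int) + 1) (chain.length : Int) 1 :=
      PySem.List.pyRange_one_cons (by exact_mod_cast hjlt)
    have hj1c : ((j : Int) + 1) = (((j + 1 : ℕ)) : Int) := by push_cast; ring
    have hj1 : (j : Int) - 1 = (((j - 1 : ℕ)) : Int) := by
      have : 1 ≤ j := by omega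
      push_cast [this]; ring
    have e1 : (PySem.List.pyGet? chain (j : Int)).getD (0,0,0) = chain[j] := by
      rw [PySem.List.pyGet?_natCast, List.getElem?_eq_getElem hjlt]; rfl
    have e2 : (PySem.List.pyGet? chain ((j : Int) - 1)).getD (0,0,0) = chain[j-1]'(by omega) := by
      rw [hj1, PySem.List.pyGet?_natCast, List.getElem?_eq_getElem (by omega)]; rfl
    have e3 : (PySem.List.pyGet? chain ((seg : ℕ) : Int)).getD (0,0,0) = chain[seg] := by
      rw [PySem.List.pyGet?_natCast, List.getElem?_eq_getElem hseglt]; rfl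
    have ehead : ((chain.drop seg).take (j - seg)).headD c0 = chain[seg] :=
      pv_take_headD chain seg (j - seg) c0 hseglt (by omega)
    have elast : ((chain.drop seg).take (j - seg)).getLastD c0 = chain[j-1]'(by omega) :=
      pv_take_getLastD chain seg j c0 hsj (by omega)
    have hdropj : chain.drop j = chain[j] :: chain.drop (j+1) := List.drop_eq_getElem_cons hjlt
    rw [hcons]
    simp only [List.foldl_cons, pvStepB, e1, e2, e3]
    rw [hdropj]
    by_cases hc : (chain[j]).2.1 = (chain[j-1]'(by omega)).2.2 ∧
        (chain[j]).2.1 - (chain[seg]).2.1 > size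
    · rw [if_pos hc]
      rw [pvB_fold_acc chain size _ ([] ++ [(j : Int)]) (j : Int)]
      have := ih (j+1) j (by omega) (by omega)
      rw [hj1c] at *
      have hcur1 : (chain.drop j).take (j + 1 - j) = [chain[j]] := by
        rw [show j + 1 - j = 1 from by omega, hdropj, List.take_succ_cons, List.take_zero]
      rw [hcur1] at this
      simp only [List.nil_append, List.cons_append]
      rw [pvPairs_cons, PySem.List.slice_natCast]
      simp only [pvGo]
      rw [if_pos (by rw [ehead, elast]; exact hc)]
      exact congrArg (List.cons _) this
    · rw [if_neg hc]
      have := ih (j+1) seg (by omega) (by omega)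
      rw [hj1c]
      rw [this]
      have hcur : (chain.drop seg).take (j + 1 - seg)
          = (chain.drop seg).take (j - seg) ++ [chain[j]] :=
        pv_take_concat chain seg j (by omega) hjlt
      rw [hcur]
      simp only [pvGo]
      rw [if_neg (by rw [ehead, elast]; exact hc)]

theorem break_chains_spec : Claim_equal_break_chains := by
  unfold Claim_equal_break_chains
  intro chain size _ hpre
  unfold Spec_break_chains
  cases chain with
  | nil => exact absurd rfl hpre
  | cons c0 rest =>
    rw [pvA_eq_go]
    have hbc : break_chains_alt (c0 :: rest) size
        = pvPairs (c0 :: rest)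
            (((PySem.List.pyRange 1 ((c0 :: rest).length : Int) 1).foldl
              (pvStepB (c0 :: rest) size) ([0], 0)).1 ++ [((c0 :: rest).length : Int)]) := by
      rw [break_chains_alt, if_neg (by simp)]
      rfl
    rw [hbc, pvB_fold_acc (c0 :: rest) size _ [0] 0]
    have main := pv_main (c0 :: rest) size c0 rest.length 1 0 (by simp [Nat.add_comm]) (by omega)
    simp only [Nat.cast_zero, Nat.cast_one] at main
    simp only [List.drop_zero, List.drop_one, List.tail_cons] at main
    have hcur : ((c0 :: rest).take (1 - 0)) = [c0] := by simp
    rw [hcur] at main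
    simp only [List.cons_append, List.nil_append]
    exact main.symm
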